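-- pv_equiv track=rewrite | github.com/ulinduanushaherth/MakeSense | eviot/query/decompose.py | suppress_subphrases
-- ===== SOURCE A (Python) =====
-- def suppress_subphrases(phrases):
--     final = []
--     for p in phrases:
--         drop = False
--         for q in phrases:
--             if p == q:
--                 continue
--             if p in q and len(q.split()) > len(p.split()):
--                 drop = True
--                 break
--         if not drop:
--             final.append(p)
--     return final
-- ===== SOURCE B (Python) =====
-- def suppress_subphrases(phrases):
--     # Sort the distinct phrases by word count (longest first) and sweep once:
--     # phrases from completed runs (strictly larger word count) are the only
--     # candidates that can suppress the current one; then filter the original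
--     # list by the collected dropped set.
--     dropped = set()
--     longer = []   # distinct phrases from completed runs (strictly larger word count)
--     pending = []  # current run: phrases whose word count equals w
--     w = None
--     for p in sorted(dict.fromkeys(phrases), key=lambda s: len(s.split()), reverse=True):
--         pw = len(p.split())
--         if pw != w:
--             longer += pending
--             pending = []
--             w = pw
--         if any(p in q for q in longer):
--             dropped.add(p)
--         pending.append(p)
--     return [p for p in phrases if p not in dropped]
-- ===== Notes on version B (the rewrite author's own statement) =====
-- stated objective: faster
-- what changed: B sorts the distinct phrases by word count descending and makes one sweep with a run accumulator (only phrases from completed, strictly-longer runs are suppression candidates, each distinct phrase split and tested once), collecting a dropped set, then filters the original list; A re-scans and re-splits the whole list for every element.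
import Mathlib
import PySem

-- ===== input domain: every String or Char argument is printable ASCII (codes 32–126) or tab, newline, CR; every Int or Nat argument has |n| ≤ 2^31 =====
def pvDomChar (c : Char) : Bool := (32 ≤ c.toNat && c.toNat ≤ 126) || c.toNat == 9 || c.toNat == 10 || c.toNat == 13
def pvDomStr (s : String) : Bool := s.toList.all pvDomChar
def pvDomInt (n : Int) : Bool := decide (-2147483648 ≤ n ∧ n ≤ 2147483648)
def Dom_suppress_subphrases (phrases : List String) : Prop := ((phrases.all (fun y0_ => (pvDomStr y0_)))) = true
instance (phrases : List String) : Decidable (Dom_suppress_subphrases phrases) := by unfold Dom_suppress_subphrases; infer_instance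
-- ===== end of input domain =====

-- B replaces A's quadratic rescan by a sort-by-word-count sweep over the distinct phrases
-- with a strictly-longer-run accumulator and a dropped set (objective: alternative).

-- ===== PORT A =====
-- inner 'for q in phrases' loop with continue/break, returning the final value of 'drop'
def ssDropLoop (phrases : List String) (p : String) : List String → Bool
  | [] => false
  | q :: rest =>
    if p == q then ssDropLoop phrases p rest
    else if PySem.Str.isIn p q && decide ((PySem.Str.split₀ q).length > (PySem.Str.split₀ p).length) then true
    else ssDropLoop phrases p rest

def suppress_subphrases (phrases : List String) : List String :=
  phrases.foldl (fun final p =>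
    let drop := ssDropLoop phrases p phrases
    if !drop then final ++ [p] else final) []

-- ===== PORT B =====
-- word count: len(s.split())
def sbWC (s : String) : Int := ((PySem.Str.split₀ s).length : Int)

-- one loop body of the sweep; state = (dropped, longer, pending, w)
def sbStep (st : PySem.Set String × List String × List String × Option Int) (p : String) :
    PySem.Set String × List String × List String × Option Int :=
  let pw := sbWC p
  let lpw : List String × List String × Option Int :=
    if some pw ≠ st.2.2.2 then (st.2.1 ++ st.2.2.1, [], some pw) else st.2
  let dropped := if lpw.1.any (fun q => PySem.Str.isIn p q) then PySem.Set.add st.1 p else st.1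
  (dropped, lpw.1, lpw.2.1 ++ [p], lpw.2.2)

def suppress_subphrases_alt (phrases : List String) : List String :=
  let srt := PySem.List.sorted (PySem.List.dedup phrases) sbWC true
  let st := srt.foldl sbStep (PySem.Set.empty, [], [], none)
  phrases.filter (fun p => !(st.1.contains p))

-- ===== PRECONDITION & SPEC =====
def Spec_suppress_subphrases (phrases : List String) (out : List String) : Prop := out = suppress_subphrases_alt phrases
instance (phrases : List String) (out : List String) : Decidable (Spec_suppress_subphrases phrases out) := by unfold Spec_suppress_subphrases; infer_instance

-- ===== CLAIM (what is proved, stated in full; the proofs are below) =====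
def Claim_equal_suppress_subphrases : Prop := ∀ (phrases : List String), Dom_suppress_subphrases phrases → Spec_suppress_subphrases phrases (suppress_subphrases phrases)

-- ===== LEMMAS AND PROOFS =====

-- the suppression test of phrase s against candidate list l
def ssCond (l : List String) (s : String) : Bool :=
  l.any (fun q => PySem.Str.isIn s q && decide (sbWC s < sbWC q))

-- A's inner loop is an 'any' over the list (the p == q guard is redundant: equal strings have equal word counts)
theorem ssDropLoop_eq_any (phrases : List String) (p : String) (l : List String) :
    ssDropLoop phrases p l = ssCond l p := by
  induction l with
  | nil => rfl
  | cons q rest ih =>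
    by_cases hpq : p = q
    · subst hpq
      have h : ssCond (p :: rest) p = ssCond rest p := by simp [ssCond]
      simp [ssDropLoop, ih, h]
    · simp only [ssDropLoop, beq_iff_eq, hpq, if_false, ssCond, List.any_cons, ih]
      have : (decide ((PySem.Str.split₀ q).length > (PySem.Str.split₀ p).length))
          = decide (sbWC p < sbWC q) := by simp [sbWC]
      rw [this]
      cases PySem.Str.isIn p q && decide (sbWC p < sbWC q) <;> simp

-- the sweep invariant: the dropped set of the fold contains exactly the consumed
-- phrases that some strictly-longer phrase of srt contains as a substring
theorem sweep_inv (srt : List String) :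
    srt.Pairwise (fun a b => sbWC b ≤ sbWC a) → srt.Nodup →
    ∀ (rest done longer pending : List String) (w : Option Int) (dropped : PySem.Set String),
    srt = done ++ rest →
    longer ++ pending = done →
    (∀ q ∈ pending, w = some (sbWC q)) →
    (∀ q ∈ longer, ∀ v, w = some v → v < sbWC q) →
    (w = none → done = []) →
    (∀ v, w = some v → pending ≠ []) →
    (∀ s, s ∈ dropped ↔ s ∈ done ∧ ssCond srt s = true) →
    ∀ s, s ∈ (rest.foldl sbStep (dropped, longer, pending, w)).1
        ↔ (s ∈ srt ∧ ssCond srt s = true) := by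
  intro hsorted hnd rest
  induction rest with
  | nil =>
    intro done longer pending w dropped hsplit _ _ _ _ _ H6 s
    simp only [List.foldl_nil]
    rw [H6 s, hsplit]
    simp
  | cons p rest' ih =>
    intro done longer pending w dropped hsplit H1 H2 H3 H4 H5 H6
    -- facts from sortedness and the split
    have hpSorted : ∀ a ∈ done, ∀ b ∈ p :: rest', sbWC b ≤ sbWC a := by
      intro a ha b hb
      rw [hsplit] at hsorted
      exact (List.pairwise_append.mp hsorted).2.2 a ha b hb
    have hrest' : ∀ b ∈ rest', sbWC b ≤ sbWC p := by
      intro b hb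
      rw [hsplit] at hsorted
      exact (List.pairwise_cons.mp (List.pairwise_append.mp hsorted).2.1).1 b hb
    have hpNotDone : p ∉ done := by
      rw [hsplit] at hnd
      intro hmem
      exact (List.disjoint_of_nodup_append hnd) hmem (by simp)
    set pw := sbWC p with hpw
    set lpw : List String × List String × Option Int :=
      (if some pw ≠ w then (longer ++ pending, [], some pw) else (longer, pending, w)) with hlpw
    -- the two branch shapes
    have hlpwCases : (some pw ≠ w ∧ lpw = (longer ++ pending, [], some pw))
        ∨ (some pw = w ∧ lpw = (longer, pending, w)) := by
      by_cases hc : some pw = w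
      · right; exact ⟨hc, by rw [hlpw, if_neg (not_not_intro hc)]⟩
      · left; exact ⟨hc, by rw [hlpw, if_pos hc]⟩
    -- the new longer list holds exactly the strictly-longer consumed phrases
    have hmemL : ∀ q, q ∈ lpw.1 ↔ q ∈ done ∧ pw < sbWC q := by
      intro q
      rcases hlpwCases with ⟨hc, hl⟩ | ⟨hc, hl⟩
      · rw [hl]; simp only [List.mem_append]
        rcases hw : w with _ | v
        · have hdone : done = [] := H4 hw
          have hlp : longer = [] ∧ pending = [] :=
            List.append_eq_nil_iff.mp (hdone ▸ H1)
          simp [hdone, hlp.1, hlp.2]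
        · obtain ⟨q0, hq0⟩ := List.exists_mem_of_ne_nil _ (H5 v hw)
          have hq0v : sbWC q0 = v := by
            have h := H2 q0 hq0; rw [hw] at h
            exact (Option.some.injEq _ _ ▸ h).symm
          have hq0done : q0 ∈ done := H1 ▸ List.mem_append_right _ hq0
          have hple : pw ≤ v := hq0v ▸ hpSorted q0 hq0done p (by simp)
          have hpv : pw < v := lt_of_le_of_ne hple (by
            intro h; exact hc (by rw [hw, h]))
          constructor
          · rintro (hq | hq)
            · exact ⟨H1 ▸ List.mem_append_left _ hq, lt_trans hpv (H3 q hq v hw)⟩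
            · have hqv : sbWC q = v := by
                have h := H2 q hq; rw [hw] at h
                exact (Option.some.injEq _ _ ▸ h).symm
              exact ⟨H1 ▸ List.mem_append_right _ hq, hqv ▸ hpv⟩
          · rintro ⟨hq, -⟩
            exact List.mem_append.mp (H1 ▸ hq)
      · rw [hl]
        constructor
        · intro hq
          exact ⟨H1 ▸ List.mem_append_left _ hq, H3 q hq pw hc.symm⟩
        · rintro ⟨hq, hlt⟩
          rcases List.mem_append.mp (H1 ▸ hq) with hq | hq
          · exact hq
          · exfalso
            have h := H2 q hq; rw [← hc] at h
            have : sbWC q = pw := (Option.some.injEq _ _ ▸ h).symm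
            omega
    -- the drop test over the new longer equals the global suppression condition at p
    have hdroptest : lpw.1.any (fun q => PySem.Str.isIn p q) = ssCond srt p := by
      rw [Bool.eq_iff_iff]
      simp only [List.any_eq_true, ssCond, Bool.and_eq_true, decide_eq_true_eq]
      constructor
      · rintro ⟨q, hq, hin⟩
        obtain ⟨hqd, hlt⟩ := (hmemL q).mp hq
        exact ⟨q, by rw [hsplit]; exact List.mem_append_left _ hqd, hin, hlt⟩
      · rintro ⟨q, hq, hin, hlt⟩
        refine ⟨q, (hmemL q).mpr ⟨?_, hlt⟩, hin⟩
        rw [hsplit] at hq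
        rcases List.mem_append.mp hq with hq | hq
        · exact hq
        · exfalso
          rcases List.mem_cons.mp hq with rfl | hq
          · omega
          · have := hrest' q hq; omega
    -- unfold one loop body and apply the induction hypothesis
    simp only [List.foldl_cons]
    have hstep : sbStep (dropped, longer, pending, w) p
        = ((if lpw.1.any (fun q => PySem.Str.isIn p q) then PySem.Set.add dropped p else dropped),
           lpw.1, lpw.2.1 ++ [p], lpw.2.2) := by
      simp only [sbStep, hlpw, hpw]
    rw [hstep]
    apply ih (done ++ [p]) lpw.1 (lpw.2.1 ++ [p]) lpw.2.2
    · rw [hsplit]; simp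
    · -- H1
      rcases hlpwCases with ⟨-, hl⟩ | ⟨-, hl⟩ <;> rw [hl] <;> simp [← H1]
    · -- H2
      intro q hq
      rcases hlpwCases with ⟨-, hl⟩ | ⟨hc, hl⟩ <;> rw [hl] at hq ⊢
      · simp only [List.nil_append, List.mem_singleton] at hq
        subst hq; rfl
      · rcases List.mem_append.mp hq with hq | hq
        · exact H2 q hq
        · simp only [List.mem_singleton] at hq; subst hq; exact hc.symm
    · -- H3
      intro q hq v hv
      have hq' := (hmemL q).mp hq
      have hv' : v = pw := by
        rcases hlpwCases with ⟨-, hl⟩ | ⟨hc, hl⟩ <;> rw [hl] at hv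
        · simpa using hv.symm
        · rw [← hc] at hv; simpa using hv.symm
      omega
    · -- H4
      intro hnone
      exfalso
      rcases hlpwCases with ⟨-, hl⟩ | ⟨hc, hl⟩ <;> rw [hl] at hnone
      · simp at hnone
      · rw [← hc] at hnone; simp at hnone
    · -- H5
      intro v _
      simp
    · -- H6
      intro s
      have hP : s = p → s ∉ dropped := by
        rintro rfl hmem
        exact hpNotDone ((H6 s).mp hmem).1
      by_cases hcond : lpw.1.any (fun q => PySem.Str.isIn p q) = true
      · rw [if_pos hcond]
        rw [PySem.Set.mem_add]
        constructor
        · rintro (hmem | rfl)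
          · obtain ⟨hd, hC⟩ := (H6 s).mp hmem
            exact ⟨List.mem_append_left _ hd, hC⟩
          · exact ⟨List.mem_append_right _ (by simp), by rw [← hdroptest]; exact hcond⟩
        · rintro ⟨hmem, hC⟩
          rcases List.mem_append.mp hmem with hd | hp
          · exact Or.inl ((H6 s).mpr ⟨hd, hC⟩)
          · simp only [List.mem_singleton] at hp
            exact Or.inr hp
      · rw [if_neg hcond]
        rw [H6 s]
        constructor
        · rintro ⟨hd, hC⟩
          exact ⟨List.mem_append_left _ hd, hC⟩
        · rintro ⟨hmem, hC⟩
          rcases List.mem_append.mp hmem with hd | hp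
          · exact ⟨hd, hC⟩
          · exfalso
            simp only [List.mem_singleton] at hp
            subst hp
            rw [← hdroptest] at hC
            exact hcond hC

-- ===== VERDICT (by name: the statement is the Claim_ definition above) =====
theorem suppress_subphrases_spec : Claim_equal_suppress_subphrases := by
  intro phrases _
  unfold Spec_suppress_subphrases suppress_subphrases suppress_subphrases_alt
  -- A is a filter by the global condition
  have hA : (phrases.foldl (fun final p =>
      let drop := ssDropLoop phrases p phrases
      if !drop then final ++ [p] else final) [])
      = phrases.filter (fun p => !ssCond phrases p) := by
    have h := PySem.List.foldl_append_if_eq_filter (l := phrases)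
      (p := fun p => !ssCond phrases p) (acc := [])
    simp only [List.nil_append] at h
    rw [← h]
    apply PySem.List.foldl_congr_mem
    intro acc p _
    rw [ssDropLoop_eq_any]
  rw [hA]
  -- B side
  set srt := PySem.List.sorted (PySem.List.dedup phrases) sbWC true with hsrt
  have hperm : srt.Perm (PySem.List.dedup phrases) := PySem.List.sorted_perm _ _ _
  have hsorted : srt.Pairwise (fun a b => sbWC b ≤ sbWC a) := PySem.List.sorted_pairwise_rev _ _
  have hnd : srt.Nodup := hperm.nodup_iff.mpr (PySem.List.nodup_dedup phrases)
  have hmemsrt : ∀ s, s ∈ srt ↔ s ∈ phrases := by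
    intro s
    rw [hperm.mem_iff]
    exact PySem.List.mem_dedup (xs := phrases) (x := s)
  have hcond : ∀ s, ssCond srt s = ssCond phrases s := by
    intro s
    rw [Bool.eq_iff_iff]
    simp only [ssCond, List.any_eq_true]
    constructor
    · rintro ⟨q, hq, h⟩; exact ⟨q, (hmemsrt q).mp hq, h⟩
    · rintro ⟨q, hq, h⟩; exact ⟨q, (hmemsrt q).mpr hq, h⟩
  have hfinal : ∀ s, s ∈ (srt.foldl sbStep (PySem.Set.empty, [], [], none)).1
      ↔ (s ∈ srt ∧ ssCond srt s = true) := by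
    apply sweep_inv srt hsorted hnd srt [] [] [] none PySem.Set.empty rfl rfl
      (by intro q hq; simp at hq) (by intro q hq; simp at hq) (by intro; rfl)
      (by intro v hv; simp at hv)
      (by intro s; simp [PySem.Set.empty])
  apply List.filter_congr
  intro p hp
  have h1 : (srt.foldl sbStep (PySem.Set.empty, [], [], none)).1.contains p
      = ssCond phrases p := by
    unfold PySem.Set.contains
    rw [List.contains_eq_mem, Bool.eq_iff_iff, decide_eq_true_iff, hfinal p, ← hcond p]
    constructor
    · exact fun h => h.2
    · exact fun h => ⟨(hmemsrt p).mpr hp, h⟩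
  rw [h1]
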